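-- pv_equiv track=rewrite | github.com/krith0/Viterbi-Algorithim | decoder.py | bits_diff_num
-- ===== SOURCE A (Python) =====
-- def bits_diff_num(num_1, num_2):
--     count = 0
--     min_length = min(len(num_1), len(num_2))
--
--     for i in range(min_length):
--         if num_1[i] != num_2[i]:
--             count += 1
--
--     # If one number is longer than the other, count the extra differences
--     count += abs(len(num_1) - len(num_2))
--
--     return count
-- ===== SOURCE B (Python) =====
-- from itertools import zip_longest
--
-- def bits_diff_num(num_1, num_2):
--     sentinel = object()
--     return sum(1 for a, b in zip_longest(num_1, num_2, fillvalue=sentinel) if a != b)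
-- ===== Notes on version B (the rewrite author's own statement) =====
-- stated objective: idiomatic
-- what changed: Single zip_longest pass with a fresh sentinel counts positional mismatches and absorbs the length difference (each unpaired position mismatches the sentinel), removing min_length, indexing and the abs length arithmetic.
import Mathlib
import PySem

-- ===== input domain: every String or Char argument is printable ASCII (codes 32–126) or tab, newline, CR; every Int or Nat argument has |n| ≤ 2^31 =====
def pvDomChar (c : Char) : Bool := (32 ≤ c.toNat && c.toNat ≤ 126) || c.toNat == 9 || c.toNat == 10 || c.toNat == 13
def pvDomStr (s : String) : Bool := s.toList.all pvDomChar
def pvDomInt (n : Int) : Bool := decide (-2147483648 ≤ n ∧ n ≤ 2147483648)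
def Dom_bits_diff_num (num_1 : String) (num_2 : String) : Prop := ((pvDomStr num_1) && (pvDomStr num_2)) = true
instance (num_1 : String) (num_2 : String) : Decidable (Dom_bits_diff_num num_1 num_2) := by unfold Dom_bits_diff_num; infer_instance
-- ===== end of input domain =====

-- B replaces A's indexed loop over the common prefix plus abs length arithmetic by one
-- zip_longest-style pass in which every unpaired position counts as a mismatch (idiomatic; same cost).

-- ===== PORT A =====
def bits_diff_num (num_1 : String) (num_2 : String) : Int :=
  let count : Int := 0
  let min_length : Int := min (PySem.Str.len num_1) (PySem.Str.len num_2)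
  let count := (PySem.List.pyRange 0 min_length 1).foldl
    (fun count i =>
      if PySem.Str.pyGet? num_1 i ≠ PySem.Str.pyGet? num_2 i then count + 1 else count) count
  count + |PySem.Str.len num_1 - PySem.Str.len num_2|

-- ===== PORT B =====
-- zip_longest with a fresh sentinel: an unpaired position always counts as a mismatch.
def pvZipLongestDiff : List Char → List Char → Int
  | [], [] => 0
  | [], _ :: t => 1 + pvZipLongestDiff [] t
  | _ :: t, [] => 1 + pvZipLongestDiff t []
  | a :: t1, b :: t2 => (if a ≠ b then 1 else 0) + pvZipLongestDiff t1 t2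

def bits_diff_num_alt (num_1 : String) (num_2 : String) : Int :=
  pvZipLongestDiff num_1.toList num_2.toList

-- ===== PRECONDITION & SPEC =====
def Spec_bits_diff_num (num_1 : String) (num_2 : String) (out : Int) : Prop := out = bits_diff_num_alt num_1 num_2
instance (num_1 : String) (num_2 : String) (out : Int) : Decidable (Spec_bits_diff_num num_1 num_2 out) := by unfold Spec_bits_diff_num; infer_instance

-- ===== CLAIM (what is proved, stated in full; the proofs are below) =====
def Claim_equal_bits_diff_num : Prop := ∀ (num_1 : String) (num_2 : String), Dom_bits_diff_num num_1 num_2 → Spec_bits_diff_num num_1 num_2 (bits_diff_num num_1 num_2)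

-- ===== LEMMAS AND PROOFS =====

lemma pvZ_nil_right (l : List Char) : pvZipLongestDiff l [] = (l.length : Int) := by
  induction l with
  | nil => simp [pvZipLongestDiff]
  | cons x xs ih => simp [pvZipLongestDiff, ih]; omega

lemma pvZ_nil_left (l : List Char) : pvZipLongestDiff [] l = (l.length : Int) := by
  induction l with
  | nil => simp [pvZipLongestDiff]
  | cons x xs ih => simp [pvZipLongestDiff, ih]; omega

-- A's loop + abs term, phrased over Nat ranges, equals B's single pass.
lemma pv_main (l1 l2 : List Char) :
    ((List.range (min l1.length l2.length)).countP (fun k => decide (l1[k]? ≠ l2[k]?)) : Int)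
      + |(l1.length : Int) - (l2.length : Int)| = pvZipLongestDiff l1 l2 := by
  induction l1 generalizing l2 with
  | nil =>
    rw [pvZ_nil_left]
    simp
  | cons a t1 ih =>
    cases l2 with
    | nil =>
      rw [pvZ_nil_right]
      simp
      omega
    | cons b t2 =>
      simp only [List.length_cons, Nat.succ_min_succ, List.range_succ_eq_map,
        List.countP_cons, List.countP_map, pvZipLongestDiff,
        List.getElem?_cons_zero]
      have habs : ((t1.length : Int) + 1) - ((t2.length : Int) + 1)
          = (t1.length : Int) - (t2.length : Int) := by omega
      push_cast
      rw [habs, ← ih t2]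
      have hc : List.countP ((fun k : Nat => !decide ((a :: t1)[k]? = (b :: t2)[k]?)) ∘ Nat.succ)
            (List.range (min t1.length t2.length))
          = List.countP (fun k : Nat => !decide (t1[k]? = t2[k]?))
            (List.range (min t1.length t2.length)) :=
        List.countP_congr (by intro k _; simp)
      by_cases h : a = b
      · simp only [h] at hc ⊢
        simp [hc]
      · simp [h, hc]
        omega

-- Bridge A's port to the Nat-range count form.
lemma pvA_eq (num_1 num_2 : String) :
    bits_diff_num num_1 num_2 = bits_diff_num_alt num_1 num_2 := by
  unfold bits_diff_num bits_diff_num_alt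
  set l1 := num_1.toList
  set l2 := num_2.toList
  simp only [PySem.Str.len_eq]
  rw [PySem.List.foldl_ite_add_one]
  rw [PySem.List.pyRange_one]
  simp only [List.countP_map]
  have hmin : ((min (l1.length : Int) (l2.length : Int)) - 0).toNat
      = min l1.length l2.length := by omega
  rw [hmin]
  have hpred : ((fun x : Int => decide (PySem.Str.pyGet? num_1 x ≠ PySem.Str.pyGet? num_2 x))
        ∘ fun k : Nat => (0 : Int) + k)
      = fun k : Nat => decide (l1[k]? ≠ l2[k]?) := by
    funext k
    simp [Function.comp, l1, l2]
  rw [hpred, zero_add]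
  exact pv_main num_1.toList num_2.toList

-- ===== VERDICT (by name: the statement is the Claim_ definition above) =====
theorem bits_diff_num_spec : Claim_equal_bits_diff_num := by
  intro n1 n2 _
  exact pvA_eq n1 n2
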